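-- pv_equiv track=rewrite | github.com/1193639809ZD/PythonStudy | 笔试/美团/2024-春/5_小美的区间删除.py | count_schemes
-- ===== SOURCE A (Python) =====
-- def count_factors(num):
--     count_2 = 0
--     count_5 = 0
--
--     while num % 2 == 0:
--         count_2 += 1
--         num //= 2
--
--     while num % 5 == 0:
--         count_5 += 1
--         num //= 5
--
--     return count_2, count_5
--
-- def count_schemes(nums, k):
--     n = len(nums)
--     count_2 = [0] * (n + 1)
--     count_5 = [0] * (n + 1)
--
--     # 计算前缀和
--     for i in range(n):
--         c2, c5 = count_factors(nums[i])
--         count_2[i + 1] = count_2[i] + c2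
--         count_5[i + 1] = count_5[i] + c5
--
--     schemes = 0
--
--     # 遍历所有可能的区间
--     for start in range(n):
--         for end in range(start, n):
--             # 计算删除区间 [start, end] 后剩余元素的因子数量
--             remaining_2 = count_2[n] - (count_2[end + 1] - count_2[start])
--             remaining_5 = count_5[n] - (count_5[end + 1] - count_5[start])
--
--             # 检查剩余元素中的 2 和 5 的因子数量是否都大于等于 k
--             if remaining_2 >= k and remaining_5 >= k:
--                 schemes += 1
--
--     return schemes
-- ===== SOURCE B (Python) =====
-- def _f(num):
--     # multiplicities of 2 then 5, stripping 2s first (recursive)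
--     if num % 2 == 0:
--         a, b = _f(num // 2)
--         return a + 1, b
--     if num % 5 == 0:
--         a, b = _f(num // 5)
--         return a, b + 1
--     return 0, 0
--
-- def count_schemes(nums, k):
--     # prefix sums of factor counts, then a two-pointer sweep: O(n)
--     p2 = [0]
--     p5 = [0]
--     a = 0
--     b = 0
--     for x in nums:
--         da, db = _f(x)
--         a += da
--         b += db
--         p2.append(a)
--         p5.append(b)
--     n = len(nums)
--     t2 = p2[n]
--     t5 = p5[n]
--     total = 0
--     j = 0
--     for s in range(n):
--         if j < s:
--             j = s
--         while j < n and t2 - (p2[j + 1] - p2[s]) >= k and t5 - (p5[j + 1] - p5[s]) >= k: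
--             j += 1
--         total += j - s
--     return total
-- ===== Notes on version B (the rewrite author's own statement) =====
-- stated objective: faster
-- what changed: B replaces A's O(n^2) double loop over all intervals by a single two-pointer sweep over the monotone prefix sums of 2/5 factor multiplicities (and computes the per-element factor counts by one recursive helper instead of two while loops).
import Mathlib
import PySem

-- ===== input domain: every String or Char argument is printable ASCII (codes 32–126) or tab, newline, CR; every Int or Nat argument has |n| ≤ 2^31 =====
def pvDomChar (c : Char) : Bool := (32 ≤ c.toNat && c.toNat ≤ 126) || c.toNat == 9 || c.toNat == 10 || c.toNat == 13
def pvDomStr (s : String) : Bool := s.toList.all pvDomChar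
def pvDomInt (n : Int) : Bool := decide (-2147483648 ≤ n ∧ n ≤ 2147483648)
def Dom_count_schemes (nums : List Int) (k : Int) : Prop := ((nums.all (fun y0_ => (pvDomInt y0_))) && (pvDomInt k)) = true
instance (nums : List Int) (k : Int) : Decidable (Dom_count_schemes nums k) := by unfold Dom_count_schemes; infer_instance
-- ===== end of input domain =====

-- B replaces A's quadratic scan over all intervals by a two-pointer sweep over the
-- monotone prefix sums of 2/5 factor multiplicities (measured faster; asymptotic).


-- ===== PORT A =====
-- termination facts the ports cite in their decreasing_by
lemma pvHalf (num : Int) (h0 : num ≠ 0) (h2 : PySem.Int.mod num 2 = 0) :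
    PySem.Int.floordiv num 2 ≠ 0 ∧ (PySem.Int.floordiv num 2).natAbs < num.natAbs := by
  rw [PySem.Int.floordiv_eq_ediv_of_pos (by norm_num)]
  have := (PySem.Int.mod_eq_zero_iff_dvd num 2).mp h2
  omega

lemma pvFifth (num : Int) (h0 : num ≠ 0) (h5 : PySem.Int.mod num 5 = 0) :
    PySem.Int.floordiv num 5 ≠ 0 ∧ (PySem.Int.floordiv num 5).natAbs < num.natAbs := by
  rw [PySem.Int.floordiv_eq_ediv_of_pos (by norm_num)]
  have := (PySem.Int.mod_eq_zero_iff_dvd num 5).mp h5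
  omega

def pvStrip2 (num : Int) (c : Int) : Int × Int :=
  if h : num ≠ 0 ∧ PySem.Int.mod num 2 = 0 then pvStrip2 (PySem.Int.floordiv num 2) (c + 1) else (c, num)
termination_by num.natAbs
decreasing_by exact (pvHalf num h.1 h.2).2

def pvStrip5 (num : Int) (c : Int) : Int × Int :=
  if h : num ≠ 0 ∧ PySem.Int.mod num 5 = 0 then pvStrip5 (PySem.Int.floordiv num 5) (c + 1) else (c, num)
termination_by num.natAbs
decreasing_by exact (pvFifth num h.1 h.2).2

def count_factors (num : Int) : Int × Int :=
  let r2 := pvStrip2 num 0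
  let r5 := pvStrip5 r2.2 0
  (r2.1, r5.1)

def pvBuildA (nums : List Int) (st : List Int × List Int) (i : Int) : List Int × List Int :=
  let cf := count_factors (PySem.List.pyGetD nums i 0)
  (PySem.List.pySetD st.1 (i + 1) (PySem.List.pyGetD st.1 i 0 + cf.1),
   PySem.List.pySetD st.2 (i + 1) (PySem.List.pyGetD st.2 i 0 + cf.2))

def pvCntA (arrs : List Int × List Int) (k n start : Int) (schemes : Int) (end_ : Int) : Int :=
  let remaining_2 := PySem.List.pyGetD arrs.1 n 0 -
    (PySem.List.pyGetD arrs.1 (end_ + 1) 0 - PySem.List.pyGetD arrs.1 start 0)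
  let remaining_5 := PySem.List.pyGetD arrs.2 n 0 -
    (PySem.List.pyGetD arrs.2 (end_ + 1) 0 - PySem.List.pyGetD arrs.2 start 0)
  if remaining_2 ≥ k ∧ remaining_5 ≥ k then schemes + 1 else schemes

def pvOuterA (arrs : List Int × List Int) (k n : Int) (schemes : Int) (start : Int) : Int :=
  (PySem.List.pyRange start n 1).foldl (pvCntA arrs k n start) schemes

def count_schemes (nums : List Int) (k : Int) : Int :=
  let n := nums.length
  let arrs := (PySem.List.pyRange 0 (n : Int) 1).foldl (pvBuildA nums)
    (List.replicate (n + 1) 0, List.replicate (n + 1) 0)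
  (PySem.List.pyRange 0 (n : Int) 1).foldl (pvOuterA arrs k (n : Int)) 0

-- ===== PORT B =====
def pvAltF (num : Int) : Int × Int :=
  if h1 : num ≠ 0 ∧ PySem.Int.mod num 2 = 0 then
    ((pvAltF (PySem.Int.floordiv num 2)).1 + 1, (pvAltF (PySem.Int.floordiv num 2)).2)
  else if h2 : num ≠ 0 ∧ PySem.Int.mod num 5 = 0 then
    ((pvAltF (PySem.Int.floordiv num 5)).1, (pvAltF (PySem.Int.floordiv num 5)).2 + 1)
  else (0, 0)
termination_by num.natAbs
decreasing_by
  · exact (pvHalf num h1.1 h1.2).2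
  · exact (pvFifth num h2.1 h2.2).2

def pvBuildB (st : List Int × List Int × Int × Int) (x : Int) : List Int × List Int × Int × Int :=
  let d := pvAltF x
  let a := st.2.2.1 + d.1
  let b := st.2.2.2 + d.2
  (st.1 ++ [a], st.2.1 ++ [b], a, b)

lemma pvAdvTerm (n j : Int) (h : j < n) : (n - (j + 1)).toNat < (n - j).toNat := by omega

def pvAdvance (p2 p5 : List Int) (t2 t5 k n s j : Int) : Int :=
  if h : j < n ∧ t2 - (PySem.List.pyGetD p2 (j + 1) 0 - PySem.List.pyGetD p2 s 0) ≥ k ∧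
         t5 - (PySem.List.pyGetD p5 (j + 1) 0 - PySem.List.pyGetD p5 s 0) ≥ k then
    pvAdvance p2 p5 t2 t5 k n s (j + 1)
  else j
termination_by (n - j).toNat
decreasing_by exact pvAdvTerm n j h.1

def pvSweepB (p2 p5 : List Int) (t2 t5 k n : Int) (acc : Int × Int) (s : Int) : Int × Int :=
  let j0 := if acc.2 < s then s else acc.2
  let j := pvAdvance p2 p5 t2 t5 k n s j0
  (acc.1 + (j - s), j)

def count_schemes_alt (nums : List Int) (k : Int) : Int :=
  let st := nums.foldl pvBuildB ([0], [0], 0, 0)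
  let n := nums.length
  let t2 := PySem.List.pyGetD st.1 (n : Int) 0
  let t5 := PySem.List.pyGetD st.2.1 (n : Int) 0
  let fin := (PySem.List.pyRange 0 (n : Int) 1).foldl (pvSweepB st.1 st.2.1 t2 t5 k (n : Int)) (0, 0)
  fin.1

-- A's array invariant

-- ===== PRECONDITION & SPEC =====
-- Pre_ excludes lists containing 0: on those A's loop 'while num % 2 == 0' never
-- terminates (and B's recursion likewise does not return), so A returns on no such input.
def Pre_count_schemes (nums : List Int) (k : Int) : Prop := (0 : Int) ∉ nums
instance (nums : List Int) (k : Int) : Decidable (Pre_count_schemes nums k) := by unfold Pre_count_schemes; infer_instance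
def pvWitness_count_schemes : List Int × Int := ([2, 5, 10], 1)

def Spec_count_schemes (nums : List Int) (k : Int) (out : Int) : Prop := out = count_schemes_alt nums k
instance (nums : List Int) (k : Int) (out : Int) : Decidable (Spec_count_schemes nums k out) := by unfold Spec_count_schemes; infer_instance

-- ===== CLAIM (what is proved, stated in full; the proofs are below) =====
def Claim_equal_count_schemes : Prop := ∀ (nums : List Int) (k : Int), Dom_count_schemes nums k → Pre_count_schemes nums k → Spec_count_schemes nums k (count_schemes nums k)

-- ===== LEMMAS AND PROOFS =====
lemma pvOdd5 (num : Int) (h : PySem.Int.mod num 2 ≠ 0) (h5 : PySem.Int.mod num 5 = 0) :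
    PySem.Int.mod (PySem.Int.floordiv num 5) 2 ≠ 0 := by
  rw [PySem.Int.floordiv_eq_ediv_of_pos (by norm_num)]
  rw [PySem.Int.mod_eq_emod_of_pos (by norm_num)] at h
  rw [PySem.Int.mod_eq_emod_of_pos (by norm_num)]
  have := (PySem.Int.mod_eq_zero_iff_dvd num 5).mp h5
  omega

lemma pvStrip2_step (num c : Int) (hg : num ≠ 0 ∧ PySem.Int.mod num 2 = 0) :
    pvStrip2 num c = pvStrip2 (PySem.Int.floordiv num 2) (c + 1) := by
  rw [pvStrip2]; exact dif_pos hg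

lemma pvStrip2_stuck (num c : Int) (hg : ¬(num ≠ 0 ∧ PySem.Int.mod num 2 = 0)) :
    pvStrip2 num c = (c, num) := by
  rw [pvStrip2]; exact dif_neg hg

lemma pvStrip5_step (num c : Int) (hg : num ≠ 0 ∧ PySem.Int.mod num 5 = 0) :
    pvStrip5 num c = pvStrip5 (PySem.Int.floordiv num 5) (c + 1) := by
  rw [pvStrip5]; exact dif_pos hg

lemma pvStrip5_stuck (num c : Int) (hg : ¬(num ≠ 0 ∧ PySem.Int.mod num 5 = 0)) :
    pvStrip5 num c = (c, num) := by
  rw [pvStrip5]; exact dif_neg hg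

lemma pvAltF_step2 (num : Int) (hg : num ≠ 0 ∧ PySem.Int.mod num 2 = 0) :
    pvAltF num = ((pvAltF (PySem.Int.floordiv num 2)).1 + 1, (pvAltF (PySem.Int.floordiv num 2)).2) := by
  rw [pvAltF]; exact dif_pos hg

lemma pvAltF_step5 (num : Int) (h2 : PySem.Int.mod num 2 ≠ 0) (hg : num ≠ 0 ∧ PySem.Int.mod num 5 = 0) :
    pvAltF num = ((pvAltF (PySem.Int.floordiv num 5)).1, (pvAltF (PySem.Int.floordiv num 5)).2 + 1) := by
  rw [pvAltF, dif_neg (fun hc => h2 hc.2)]; exact dif_pos hg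

lemma pvAltF_stuck (num : Int) (h2 : ¬(num ≠ 0 ∧ PySem.Int.mod num 2 = 0))
    (h5 : ¬(num ≠ 0 ∧ PySem.Int.mod num 5 = 0)) : pvAltF num = (0, 0) := by
  rw [pvAltF, dif_neg h2]; exact dif_neg h5

lemma pvAltF_nonneg (num : Int) : 0 ≤ (pvAltF num).1 ∧ 0 ≤ (pvAltF num).2 := by
  fun_induction pvAltF num with
  | case1 num h ih => simp_all; omega
  | case2 num h1 h2 ih => simp_all; omega
  | case3 => simp

lemma pvStrip2_acc : ∀ (m : Nat) (num c : Int), num.natAbs ≤ m →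
    pvStrip2 num c = (c + (pvStrip2 num 0).1, (pvStrip2 num 0).2) := by
  intro m
  induction m with
  | zero =>
    intro num c h
    have h0 : num = 0 := by omega
    subst h0
    rw [pvStrip2_stuck _ _ (by norm_num), pvStrip2_stuck _ _ (by norm_num)]
    norm_num
  | succ m ih =>
    intro num c h
    by_cases hg : num ≠ 0 ∧ PySem.Int.mod num 2 = 0
    · rw [pvStrip2_step _ _ hg, pvStrip2_step _ _ hg]
      have hlt := (pvHalf num hg.1 hg.2).2
      rw [ih _ (c + 1) (by omega), ih _ (0 + 1) (by omega)]
      simp only [Prod.mk.injEq]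
      refine ⟨by ring, by simp⟩
    · rw [pvStrip2_stuck _ _ hg, pvStrip2_stuck _ _ hg]
      norm_num

lemma pvStrip5_acc : ∀ (m : Nat) (num c : Int), num.natAbs ≤ m →
    pvStrip5 num c = (c + (pvStrip5 num 0).1, (pvStrip5 num 0).2) := by
  intro m
  induction m with
  | zero =>
    intro num c h
    have h0 : num = 0 := by omega
    subst h0
    rw [pvStrip5_stuck _ _ (by norm_num), pvStrip5_stuck _ _ (by norm_num)]
    norm_num
  | succ m ih =>
    intro num c h
    by_cases hg : num ≠ 0 ∧ PySem.Int.mod num 5 = 0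
    · rw [pvStrip5_step _ _ hg, pvStrip5_step _ _ hg]
      have hlt := (pvFifth num hg.1 hg.2).2
      rw [ih _ (c + 1) (by omega), ih _ (0 + 1) (by omega)]
      simp only [Prod.mk.injEq]
      refine ⟨by ring, by simp⟩
    · rw [pvStrip5_stuck _ _ hg, pvStrip5_stuck _ _ hg]
      norm_num

lemma pvAltF_fst_of_odd : ∀ (m : Nat) (num : Int), num.natAbs ≤ m →
    PySem.Int.mod num 2 ≠ 0 → (pvAltF num).1 = 0 := by
  intro m
  induction m with
  | zero =>
    intro num h hodd
    have h0 : num = 0 := by omega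
    subst h0
    rw [pvAltF_stuck _ (by norm_num) (by norm_num)]
  | succ m ih =>
    intro num h hodd
    by_cases hg : num ≠ 0 ∧ PySem.Int.mod num 5 = 0
    · rw [pvAltF_step5 _ hodd hg]
      have hlt := (pvFifth num hg.1 hg.2).2
      exact ih _ (by omega) (pvOdd5 num hodd hg.2)
    · rw [pvAltF_stuck _ (fun hc => hodd hc.2) hg]

lemma pvStrip5_eq_altF : ∀ (m : Nat) (num : Int), num.natAbs ≤ m → num ≠ 0 →
    PySem.Int.mod num 2 ≠ 0 → (pvStrip5 num 0).1 = (pvAltF num).2 := by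
  intro m
  induction m with
  | zero =>
    intro num h h0
    omega
  | succ m ih =>
    intro num h h0 hodd
    by_cases hg : num ≠ 0 ∧ PySem.Int.mod num 5 = 0
    · rw [pvStrip5_step _ _ hg, pvAltF_step5 _ hodd hg]
      obtain ⟨hne, hlt⟩ := pvFifth num hg.1 hg.2
      rw [pvStrip5_acc m _ (0 + 1) (by omega)]
      have heq := ih _ (by omega) hne (pvOdd5 num hodd hg.2)
      simp only [heq]
      ring
    · rw [pvStrip5_stuck _ _ hg, pvAltF_stuck _ (fun hc => hodd hc.2) hg]

lemma pvStrip2_master : ∀ (m : Nat) (num : Int), num.natAbs ≤ m → num ≠ 0 →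
    (pvStrip2 num 0).2 ≠ 0 ∧ PySem.Int.mod (pvStrip2 num 0).2 2 ≠ 0 ∧
    (pvStrip2 num 0).1 = (pvAltF num).1 ∧ (pvAltF (pvStrip2 num 0).2).2 = (pvAltF num).2 := by
  intro m
  induction m with
  | zero =>
    intro num h h0
    omega
  | succ m ih =>
    intro num h h0
    by_cases hg : num ≠ 0 ∧ PySem.Int.mod num 2 = 0
    · rw [pvStrip2_step _ _ hg, pvAltF_step2 _ hg]
      obtain ⟨hne, hlt⟩ := pvHalf num hg.1 hg.2
      obtain ⟨m1, m2, m3, m4⟩ := ih _ (by omega) hne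
      rw [pvStrip2_acc m _ (0 + 1) (by omega)]
      refine ⟨m1, m2, ?_, m4⟩
      simp only [m3]
      ring
    · have hodd : PySem.Int.mod num 2 ≠ 0 := fun hc => hg ⟨h0, hc⟩
      rw [pvStrip2_stuck _ _ hg]
      exact ⟨h0, hodd, by rw [pvAltF_fst_of_odd num.natAbs num le_rfl hodd], rfl⟩

lemma count_factors_eq (num : Int) (h0 : num ≠ 0) : count_factors num = pvAltF num := by
  obtain ⟨m1, m2, m3, m4⟩ := pvStrip2_master num.natAbs num le_rfl h0
  show ((pvStrip2 num 0).1, (pvStrip5 (pvStrip2 num 0).2 0).1) = pvAltF num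
  rw [m3, pvStrip5_eq_altF (pvStrip2 num 0).2.natAbs _ le_rfl m1 m2, m4]

def pvG2 (x : Int) : Int := (pvAltF x).1

def pvG5 (x : Int) : Int := (pvAltF x).2

def pvP (g : Int → Int) (nums : List Int) (i : Nat) : Int := ((nums.take i).map g).sum

def pvQ (nums : List Int) (k : Int) (s e : Nat) : Bool :=
  decide (pvP pvG2 nums nums.length - (pvP pvG2 nums (e + 1) - pvP pvG2 nums s) ≥ k ∧
          pvP pvG5 nums nums.length - (pvP pvG5 nums (e + 1) - pvP pvG5 nums s) ≥ k)

def pvJ (nums : List Int) (k : Int) (s j : Nat) : Nat :=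
  if j < nums.length ∧ pvQ nums k s j = true then pvJ nums k s (j + 1) else j
termination_by nums.length - j

def pvSum (nums : List Int) (k : Int) (m : Nat) : Int :=
  ∑ s ∈ Finset.range m, ((pvJ nums k s s : Int) - (s : Int))

def pvJprev (nums : List Int) (k : Int) : Nat → Nat
  | 0 => 0
  | m + 1 => pvJ nums k m m

def pvScan (g : Int → Int) (acc : Int) : List Int → List Int
  | [] => []
  | x :: l => (acc + g x) :: pvScan g (acc + g x) l

lemma pvP_succ (g : Int → Int) (nums : List Int) (i : Nat) (h : i < nums.length) :
    pvP g nums (i + 1) = pvP g nums i + g nums[i] := by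
  unfold pvP
  rw [List.take_add_one, List.getElem?_eq_getElem h]
  rw [List.map_append, List.sum_append]
  simp

lemma pvP_mono (g : Int → Int) (hg : ∀ x, 0 ≤ g x) (nums : List Int) {i j : Nat} (h : i ≤ j) :
    pvP g nums i ≤ pvP g nums j := by
  induction j with
  | zero => simp_all
  | succ j ih =>
    rcases Nat.lt_or_ge i (j + 1) with hlt | hge
    · rcases Nat.lt_or_ge j nums.length with hj | hj
      · calc pvP g nums i ≤ pvP g nums j := ih (by omega)
          _ ≤ pvP g nums (j + 1) := by rw [pvP_succ g nums j hj]; have := hg nums[j]; omega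
      · have : pvP g nums (j + 1) = pvP g nums j := by
          simp [pvP, List.take_of_length_le, hj, List.take_of_length_le (by omega : nums.length ≤ j + 1)]
        rw [this]; exact ih (by omega)
    · have : i = j + 1 := by omega
      simp [this]

lemma pvG2_nonneg : ∀ x : Int, 0 ≤ pvG2 x := fun x => (pvAltF_nonneg x).1

lemma pvG5_nonneg : ∀ x : Int, 0 ≤ pvG5 x := fun x => (pvAltF_nonneg x).2

lemma pvQ_anti (nums : List Int) (k : Int) (s e : Nat) (h : pvQ nums k s e = false) :
    pvQ nums k s (e + 1) = false := by
  simp only [pvQ, decide_eq_false_iff_not, not_and_or, not_le] at h ⊢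
  have h2 := pvP_mono pvG2 pvG2_nonneg nums (by omega : e + 1 ≤ e + 1 + 1)
  have h5 := pvP_mono pvG5 pvG5_nonneg nums (by omega : e + 1 ≤ e + 1 + 1)
  omega

lemma pvQ_mono_s (nums : List Int) (k : Int) {s s' : Nat} (e : Nat) (hs : s ≤ s')
    (h : pvQ nums k s e = true) : pvQ nums k s' e = true := by
  simp only [pvQ, decide_eq_true_eq] at h ⊢
  have h2 := pvP_mono pvG2 pvG2_nonneg nums hs
  have h5 := pvP_mono pvG5 pvG5_nonneg nums hs
  omega

lemma pvJ_step (nums : List Int) (k : Int) (s j : Nat)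
    (hg : j < nums.length ∧ pvQ nums k s j = true) : pvJ nums k s j = pvJ nums k s (j + 1) := by
  rw [pvJ]; simp [hg.1, hg.2]

lemma pvJ_stuck (nums : List Int) (k : Int) (s j : Nat)
    (hg : ¬(j < nums.length ∧ pvQ nums k s j = true)) : pvJ nums k s j = j := by
  rw [pvJ]; simp only [if_neg hg]

lemma pvJ_ge (nums : List Int) (k : Int) (s : Nat) : ∀ fuel j : Nat, nums.length - j ≤ fuel →
    j ≤ pvJ nums k s j := by
  intro fuel
  induction fuel with
  | zero =>
    intro j h
    rw [pvJ_stuck nums k s j (by omega)]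
  | succ fuel ih =>
    intro j h
    by_cases hg : j < nums.length ∧ pvQ nums k s j = true
    · rw [pvJ_step nums k s j hg]
      have := ih (j + 1) (by omega)
      omega
    · rw [pvJ_stuck nums k s j hg]

lemma pvJ_le (nums : List Int) (k : Int) (s : Nat) : ∀ fuel j : Nat, nums.length - j ≤ fuel →
    j ≤ nums.length → pvJ nums k s j ≤ nums.length := by
  intro fuel
  induction fuel with
  | zero =>
    intro j h hj
    rw [pvJ_stuck nums k s j (by omega)]; omega
  | succ fuel ih =>
    intro j h hj
    by_cases hg : j < nums.length ∧ pvQ nums k s j = true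
    · rw [pvJ_step nums k s j hg]
      exact ih (j + 1) (by omega) (by omega)
    · rw [pvJ_stuck nums k s j hg]; omega

lemma pvJ_true (nums : List Int) (k : Int) (s : Nat) : ∀ fuel j e : Nat, nums.length - j ≤ fuel →
    j ≤ e → e < pvJ nums k s j → pvQ nums k s e = true := by
  intro fuel
  induction fuel with
  | zero =>
    intro j e h hje he
    rw [pvJ_stuck nums k s j (by omega)] at he
    omega
  | succ fuel ih =>
    intro j e h hje he
    by_cases hg : j < nums.length ∧ pvQ nums k s j = true
    · rcases Nat.eq_or_lt_of_le hje with rfl | hlt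
      · exact hg.2
      · rw [pvJ_step nums k s j hg] at he
        exact ih (j + 1) e (by omega) (by omega) he
    · rw [pvJ_stuck nums k s j hg] at he
      omega

lemma pvJ_skip (nums : List Int) (k : Int) (s : Nat) : ∀ j : Nat, s ≤ j → j ≤ nums.length →
    (∀ e, s ≤ e → e < j → pvQ nums k s e = true) → pvJ nums k s j = pvJ nums k s s := by
  intro j hsj
  induction j, hsj using Nat.le_induction with
  | base => intro _ _; rfl
  | succ j hsj ih =>
    intro hj hall
    rw [← pvJ_step nums k s j ⟨by omega, hall j hsj (by omega)⟩]
    exact ih (by omega) (fun e he hej => hall e he (by omega))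

lemma pvBuildA_inv (nums : List Int) (hp : (0 : Int) ∉ nums) : ∀ i : Nat, i ≤ nums.length →
    ((PySem.List.pyRange 0 (i : Int) 1).foldl (pvBuildA nums)
        (List.replicate (nums.length + 1) 0, List.replicate (nums.length + 1) 0)).1.length = nums.length + 1 ∧
    ((PySem.List.pyRange 0 (i : Int) 1).foldl (pvBuildA nums)
        (List.replicate (nums.length + 1) 0, List.replicate (nums.length + 1) 0)).2.length = nums.length + 1 ∧
    (∀ t : Nat, t ≤ i →
      ((PySem.List.pyRange 0 (i : Int) 1).foldl (pvBuildA nums)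
          (List.replicate (nums.length + 1) 0, List.replicate (nums.length + 1) 0)).1.getD t 0 = pvP pvG2 nums t ∧
      ((PySem.List.pyRange 0 (i : Int) 1).foldl (pvBuildA nums)
          (List.replicate (nums.length + 1) 0, List.replicate (nums.length + 1) 0)).2.getD t 0 = pvP pvG5 nums t) := by
  intro i
  induction i with
  | zero =>
    intro _
    rw [PySem.List.pyRange_one_eq_nil (by omega)]
    refine ⟨by simp, by simp, ?_⟩
    intro t ht
    have ht0 : t = 0 := by omega
    subst ht0
    simp [pvP]
  | succ i ih =>
    intro hi
    obtain ⟨l1, l2, hv⟩ := ih (by omega)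
    have hr : PySem.List.pyRange 0 ((i : Int) + 1) 1 =
        PySem.List.pyRange 0 (i : Int) 1 ++ [(i : Int)] := PySem.List.pyRange_one_succ_right (by omega)
    have hcast : (((i : Nat) + 1 : Nat) : Int) = (i : Int) + 1 := by push_cast; ring
    rw [hcast, hr, List.foldl_append]
    set st := (PySem.List.pyRange 0 (i : Int) 1).foldl (pvBuildA nums)
        (List.replicate (nums.length + 1) 0, List.replicate (nums.length + 1) 0) with hst
    have hnum : PySem.List.pyGetD nums (i : Int) 0 = nums[i]'(by omega) := by
      rw [PySem.List.pyGetD_natCast]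
      exact List.getD_eq_getElem nums 0 (by omega)
    have hne : nums[i]'(by omega) ≠ 0 := fun hc => hp (hc ▸ List.getElem_mem _)
    have hget1 : PySem.List.pyGetD st.1 (i : Int) 0 = pvP pvG2 nums i := by
      rw [PySem.List.pyGetD_natCast]; exact (hv i le_rfl).1
    have hget2 : PySem.List.pyGetD st.2 (i : Int) 0 = pvP pvG5 nums i := by
      rw [PySem.List.pyGetD_natCast]; exact (hv i le_rfl).2
    have hcf : count_factors (PySem.List.pyGetD nums (i : Int) 0) = pvAltF (nums[i]'(by omega)) := by
      rw [hnum]; exact count_factors_eq _ hne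
    simp only [List.foldl_cons, List.foldl_nil, pvBuildA]
    rw [hcf, hget1, hget2]
    rw [show (i : Int) + 1 = (((i + 1 : Nat) : Int)) from by push_cast; ring]
    rw [PySem.List.pySetD_natCast, PySem.List.pySetD_natCast]
    refine ⟨by simp [l1], by simp [l2], ?_⟩
    intro t ht
    have hv1 : pvP pvG2 nums i + (pvAltF (nums[i]'(by omega))).1 = pvP pvG2 nums (i + 1) := by
      rw [pvP_succ pvG2 nums i (by omega)]; rfl
    have hv2 : pvP pvG5 nums i + (pvAltF (nums[i]'(by omega))).2 = pvP pvG5 nums (i + 1) := by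
      rw [pvP_succ pvG5 nums i (by omega)]; rfl
    constructor
    · rw [List.getD_eq_getElem _ _ (by rw [List.length_set, l1]; omega), List.getElem_set]
      by_cases hti : i + 1 = t
      · rw [if_pos hti, hv1, hti]
      · rw [if_neg hti]
        rw [← List.getD_eq_getElem st.1 0 (by rw [l1]; omega)]
        exact (hv t (by omega)).1
    · rw [List.getD_eq_getElem _ _ (by rw [List.length_set, l2]; omega), List.getElem_set]
      by_cases hti : i + 1 = t
      · rw [if_pos hti, hv2, hti]
      · rw [if_neg hti]
        rw [← List.getD_eq_getElem st.2 0 (by rw [l2]; omega)]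
        exact (hv t (by omega)).2

lemma pvCntA_cond (nums : List Int) (k : Int) (A1 A5 : List Int)
    (h1 : ∀ t : Nat, t ≤ nums.length → A1.getD t 0 = pvP pvG2 nums t)
    (h5 : ∀ t : Nat, t ≤ nums.length → A5.getD t 0 = pvP pvG5 nums t)
    (s j : Nat) (hs : s ≤ nums.length) (hj : j < nums.length) (acc : Int) :
    pvCntA (A1, A5) k (nums.length : Int) (s : Int) acc (j : Int) =
      if pvQ nums k s j = true then acc + 1 else acc := by
  unfold pvCntA
  have g1 : ∀ t : Nat, t ≤ nums.length → PySem.List.pyGetD A1 ((t : Nat) : Int) 0 = pvP pvG2 nums t := by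
    intro t ht; rw [PySem.List.pyGetD_natCast]; exact h1 t ht
  have g5 : ∀ t : Nat, t ≤ nums.length → PySem.List.pyGetD A5 ((t : Nat) : Int) 0 = pvP pvG5 nums t := by
    intro t ht; rw [PySem.List.pyGetD_natCast]; exact h5 t ht
  rw [show (j : Int) + 1 = (((j + 1 : Nat) : Int)) from by push_cast; ring]
  rw [g1 nums.length le_rfl, g1 (j + 1) (by omega), g1 s hs, g5 nums.length le_rfl,
      g5 (j + 1) (by omega), g5 s hs]
  have hiff : (pvP pvG2 nums nums.length - (pvP pvG2 nums (j + 1) - pvP pvG2 nums s) ≥ k ∧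
      pvP pvG5 nums nums.length - (pvP pvG5 nums (j + 1) - pvP pvG5 nums s) ≥ k) ↔
      pvQ nums k s j = true := by simp [pvQ]
  rw [if_congr hiff rfl rfl]

lemma pvInnerA_eq (nums : List Int) (k : Int) (A1 A5 : List Int)
    (h1 : ∀ t : Nat, t ≤ nums.length → A1.getD t 0 = pvP pvG2 nums t)
    (h5 : ∀ t : Nat, t ≤ nums.length → A5.getD t 0 = pvP pvG5 nums t)
    (s : Nat) (hs : s ≤ nums.length) : ∀ (fuel j : Nat), nums.length - j ≤ fuel → ∀ acc : Int,
    (PySem.List.pyRange (j : Int) (nums.length : Int) 1).foldl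
        (pvCntA (A1, A5) k (nums.length : Int) (s : Int)) acc =
      acc + ((pvJ nums k s j : Int) - (j : Int)) := by
  intro fuel
  induction fuel with
  | zero =>
    intro j h acc
    rw [PySem.List.pyRange_one_eq_nil (by omega : (nums.length : Int) ≤ (j : Int))]
    rw [pvJ_stuck nums k s j (by omega)]
    simp
  | succ fuel ih =>
    intro j h acc
    rcases Nat.lt_or_ge j nums.length with hj | hj
    · rw [PySem.List.pyRange_one_cons (by omega : (j : Int) < (nums.length : Int))]
      rw [List.foldl_cons]
      rw [show (j : Int) + 1 = (((j + 1 : Nat) : Int)) from by push_cast; ring]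
      rw [pvCntA_cond nums k A1 A5 h1 h5 s j hs hj acc]
      by_cases hq : pvQ nums k s j = true
      · rw [if_pos hq, ih (j + 1) (by omega), pvJ_step nums k s j ⟨hj, hq⟩]
        have hge := pvJ_ge nums k s (nums.length - (j + 1)) (j + 1) le_rfl
        push_cast
        ring
      · rw [if_neg hq, ih (j + 1) (by omega), pvJ_stuck nums k s j (by tauto)]
        have hstuck : pvJ nums k s (j + 1) = j + 1 := by
          by_cases hj1 : j + 1 < nums.length
          · exact pvJ_stuck nums k s (j + 1)
              (fun hc => by simpa [pvQ_anti nums k s j (by simpa using hq)] using hc.2)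
          · exact pvJ_stuck nums k s (j + 1) (by omega)
        rw [hstuck]
        push_cast
        ring
    · rw [PySem.List.pyRange_one_eq_nil (by omega : (nums.length : Int) ≤ (j : Int))]
      rw [pvJ_stuck nums k s j (by omega)]
      simp

lemma pvOuterA_eq (nums : List Int) (k : Int) (A1 A5 : List Int)
    (h1 : ∀ t : Nat, t ≤ nums.length → A1.getD t 0 = pvP pvG2 nums t)
    (h5 : ∀ t : Nat, t ≤ nums.length → A5.getD t 0 = pvP pvG5 nums t) :
    ∀ m : Nat, m ≤ nums.length →
    (PySem.List.pyRange 0 (m : Int) 1).foldl (pvOuterA (A1, A5) k (nums.length : Int)) 0 = pvSum nums k m := by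
  intro m
  induction m with
  | zero =>
    intro _
    rw [PySem.List.pyRange_one_eq_nil (by omega)]
    simp [pvSum]
  | succ m ih =>
    intro hm
    rw [show ((m + 1 : Nat) : Int) = (m : Int) + 1 from by push_cast; ring]
    rw [PySem.List.pyRange_one_succ_right (by omega), List.foldl_append, ih (by omega)]
    simp only [List.foldl_cons, List.foldl_nil]
    unfold pvOuterA
    rw [pvInnerA_eq nums k A1 A5 h1 h5 m (by omega) (nums.length - m) m le_rfl]
    simp [pvSum, Finset.sum_range_succ]
    ring

lemma pvScan_getD (g : Int → Int) : ∀ (l : List Int) (acc : Int) (i : Nat), i < l.length →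
    (pvScan g acc l).getD i 0 = acc + ((l.take (i + 1)).map g).sum := by
  intro l
  induction l with
  | nil => intro acc i h; simp at h
  | cons x l ih =>
    intro acc i h
    cases i with
    | zero => simp [pvScan]
    | succ i =>
      rw [pvScan]
      simp only [List.getD_cons_succ]
      rw [ih (acc + g x) i (by simpa using h)]
      rw [List.take_succ_cons]
      simp only [List.map_cons, List.sum_cons]
      ring

lemma pvBuildB_eq : ∀ (l : List Int) (L2 L5 : List Int) (a b : Int),
    l.foldl pvBuildB (L2, L5, a, b) =
      (L2 ++ pvScan pvG2 a l, L5 ++ pvScan pvG5 b l, a + (l.map pvG2).sum, b + (l.map pvG5).sum) := by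
  intro l
  induction l with
  | nil => intro L2 L5 a b; simp [pvScan]
  | cons x l ih =>
    intro L2 L5 a b
    rw [List.foldl_cons]
    show (l.foldl pvBuildB (L2 ++ [a + (pvAltF x).1], L5 ++ [b + (pvAltF x).2], a + (pvAltF x).1, b + (pvAltF x).2)) = _
    rw [ih]
    simp only [pvScan, pvG2, pvG5, List.map_cons, List.sum_cons, List.append_assoc,
      List.singleton_append, Prod.mk.injEq]
    refine ⟨trivial, trivial, by ring, by ring⟩

lemma pvPrefB_getD (g : Int → Int) (nums : List Int) (i : Nat) (h : i ≤ nums.length) :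
    ((0 : Int) :: pvScan g 0 nums).getD i 0 = pvP g nums i := by
  cases i with
  | zero => simp [pvP]
  | succ i =>
    rw [List.getD_cons_succ, pvScan_getD g nums 0 i (by omega)]
    simp [pvP]

lemma pvAdvance_eq (nums : List Int) (k : Int) (P2 P5 : List Int)
    (h1 : ∀ t : Nat, t ≤ nums.length → P2.getD t 0 = pvP pvG2 nums t)
    (h5 : ∀ t : Nat, t ≤ nums.length → P5.getD t 0 = pvP pvG5 nums t)
    (s : Nat) (hs : s ≤ nums.length) : ∀ fuel j : Nat, nums.length - j ≤ fuel →
    pvAdvance P2 P5 (pvP pvG2 nums nums.length) (pvP pvG5 nums nums.length) k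
        (nums.length : Int) (s : Int) (j : Int) = ((pvJ nums k s j : Nat) : Int) := by
  have g1 : ∀ t : Nat, t ≤ nums.length → PySem.List.pyGetD P2 ((t : Nat) : Int) 0 = pvP pvG2 nums t := by
    intro t ht; rw [PySem.List.pyGetD_natCast]; exact h1 t ht
  have g5 : ∀ t : Nat, t ≤ nums.length → PySem.List.pyGetD P5 ((t : Nat) : Int) 0 = pvP pvG5 nums t := by
    intro t ht; rw [PySem.List.pyGetD_natCast]; exact h5 t ht
  intro fuel
  induction fuel with
  | zero =>
    intro j h
    rw [pvAdvance, dif_neg (by omega), pvJ_stuck nums k s j (by omega)]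
  | succ fuel ih =>
    intro j h
    rcases Nat.lt_or_ge j nums.length with hj | hj
    · rw [pvAdvance]
      rw [show (j : Int) + 1 = (((j + 1 : Nat) : Int)) from by push_cast; ring]
      rw [g1 (j + 1) (by omega), g1 s hs, g5 (j + 1) (by omega), g5 s hs]
      by_cases hq : pvQ nums k s j = true
      · have hq' : pvP pvG2 nums nums.length - (pvP pvG2 nums (j + 1) - pvP pvG2 nums s) ≥ k ∧
            pvP pvG5 nums nums.length - (pvP pvG5 nums (j + 1) - pvP pvG5 nums s) ≥ k := by
          simpa [pvQ] using hq
        rw [dif_pos ⟨by omega, hq'.1, hq'.2⟩]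
        rw [ih (j + 1) (by omega), pvJ_step nums k s j ⟨hj, hq⟩]
      · have hq' : ¬(pvP pvG2 nums nums.length - (pvP pvG2 nums (j + 1) - pvP pvG2 nums s) ≥ k ∧
            pvP pvG5 nums nums.length - (pvP pvG5 nums (j + 1) - pvP pvG5 nums s) ≥ k) := by
          simpa [pvQ] using hq
        rw [dif_neg (by tauto), pvJ_stuck nums k s j (by tauto)]
    · rw [pvAdvance, dif_neg (by omega), pvJ_stuck nums k s j (by omega)]

lemma pvSweepB_eq (nums : List Int) (k : Int) (P2 P5 : List Int)
    (h1 : ∀ t : Nat, t ≤ nums.length → P2.getD t 0 = pvP pvG2 nums t)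
    (h5 : ∀ t : Nat, t ≤ nums.length → P5.getD t 0 = pvP pvG5 nums t) :
    ∀ m : Nat, m ≤ nums.length →
    (PySem.List.pyRange 0 (m : Int) 1).foldl
        (pvSweepB P2 P5 (pvP pvG2 nums nums.length) (pvP pvG5 nums nums.length) k (nums.length : Int)) (0, 0) =
      (pvSum nums k m, ((pvJprev nums k m : Nat) : Int)) := by
  intro m
  induction m with
  | zero =>
    intro _
    rw [PySem.List.pyRange_one_eq_nil (by omega)]
    simp [pvSum, pvJprev]
  | succ m ih =>
    intro hm
    rw [show ((m + 1 : Nat) : Int) = (m : Int) + 1 from by push_cast; ring]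
    rw [PySem.List.pyRange_one_succ_right (by omega), List.foldl_append, ih (by omega)]
    simp only [List.foldl_cons, List.foldl_nil]
    simp only [pvSweepB]
    -- the pointer entering iteration m
    have hprev_le : pvJprev nums k m ≤ nums.length := by
      cases m with
      | zero => simp [pvJprev]
      | succ m' => exact pvJ_le nums k m' (nums.length - m') m' le_rfl (by omega)
    have htrue : ∀ e : Nat, m ≤ e → e < max (pvJprev nums k m) m → pvQ nums k m e = true := by
      intro e he hlt
      cases m with
      | zero => simp only [pvJprev] at hlt; omega
      | succ m' =>
        have he' : e < pvJ nums k m' m' := by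
          simp only [pvJprev] at hlt; omega
        exact pvQ_mono_s nums k e (by omega)
          (pvJ_true nums k m' (nums.length - m') m' e le_rfl (by omega) he')
    have hj0 : (if ((pvJprev nums k m : Nat) : Int) < ((m : Nat) : Int) then ((m : Nat) : Int)
        else ((pvJprev nums k m : Nat) : Int)) = ((max (pvJprev nums k m) m : Nat) : Int) := by
      split_ifs with hc <;> omega
    rw [hj0]
    rw [pvAdvance_eq nums k P2 P5 h1 h5 m (by omega) (nums.length - max (pvJprev nums k m) m)
      (max (pvJprev nums k m) m) le_rfl]
    rw [pvJ_skip nums k m (max (pvJprev nums k m) m) (by omega) (by omega) htrue]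
    have : pvJprev nums k (m + 1) = pvJ nums k m m := rfl
    rw [Prod.mk.injEq]
    constructor
    · simp [pvSum, Finset.sum_range_succ]
      ring
    · simp [this]

lemma pvMain (nums : List Int) (k : Int) (hpre : (0 : Int) ∉ nums) :
    count_schemes nums k = count_schemes_alt nums k := by
  obtain ⟨l1, l2, hv⟩ := pvBuildA_inv nums hpre nums.length le_rfl
  have hB := pvBuildB_eq nums [0] [0] 0 0
  simp only [count_schemes, count_schemes_alt]
  set arrs := (PySem.List.pyRange 0 (nums.length : Int) 1).foldl (pvBuildA nums)
    (List.replicate (nums.length + 1) 0, List.replicate (nums.length + 1) 0) with harrs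
  have hA : (PySem.List.pyRange 0 (nums.length : Int) 1).foldl
      (pvOuterA arrs k (nums.length : Int)) 0 = pvSum nums k nums.length := by
    rw [show arrs = (arrs.1, arrs.2) from rfl]
    exact pvOuterA_eq nums k arrs.1 arrs.2 (fun t ht => (hv t ht).1) (fun t ht => (hv t ht).2)
      nums.length le_rfl
  rw [hA, hB]
  have hscan2 : ([(0 : Int)] ++ pvScan pvG2 0 nums) = (0 : Int) :: pvScan pvG2 0 nums := rfl
  have hscan5 : ([(0 : Int)] ++ pvScan pvG5 0 nums) = (0 : Int) :: pvScan pvG5 0 nums := rfl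
  simp only [hscan2, hscan5]
  have h1 : ∀ t : Nat, t ≤ nums.length →
      ((0 : Int) :: pvScan pvG2 0 nums).getD t 0 = pvP pvG2 nums t := fun t ht => pvPrefB_getD pvG2 nums t ht
  have h5 : ∀ t : Nat, t ≤ nums.length →
      ((0 : Int) :: pvScan pvG5 0 nums).getD t 0 = pvP pvG5 nums t := fun t ht => pvPrefB_getD pvG5 nums t ht
  have ht2 : PySem.List.pyGetD ((0 : Int) :: pvScan pvG2 0 nums) ((nums.length : Nat) : Int) 0 =
      pvP pvG2 nums nums.length := by rw [PySem.List.pyGetD_natCast]; exact h1 nums.length le_rfl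
  have ht5 : PySem.List.pyGetD ((0 : Int) :: pvScan pvG5 0 nums) ((nums.length : Nat) : Int) 0 =
      pvP pvG5 nums nums.length := by rw [PySem.List.pyGetD_natCast]; exact h5 nums.length le_rfl
  rw [ht2, ht5]
  rw [pvSweepB_eq nums k _ _ h1 h5 nums.length le_rfl]

-- ===== VERDICT (by name: the statement is the Claim_ definition above) =====
theorem count_schemes_spec : Claim_equal_count_schemes := by
  intro nums k _ hpre
  exact pvMain nums k hpre
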